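-- pv_equiv track=rewrite | github.com/crosspoint-reader/crosspoint-reader | scripts/convert_dictionary.py | is_headword_line
-- ===== SOURCE A (Python) =====
-- def is_headword_line(line):
--     """Check if a line is a Webster's ALL-CAPS headword (e.g., 'ABASE', 'AARD-VARK')."""
--     stripped = line.strip()
--     if not stripped or len(stripped) < 1:
--         return False
--     # Headwords are uppercase letters, hyphens, spaces, apostrophes, semicolons
--     # Must contain at least one letter and no lowercase letters
--     has_letter = False
--     for ch in stripped:
--         if ch.isupper():
--             has_letter = True
--         elif ch in " -';,&1234567890":
--             continue
--         else:
--             return False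
--     return has_letter
-- ===== SOURCE B (Python) =====
-- ALLOWED = set(" -';,&1234567890")
--
-- def is_headword_line(line):
--     """Check if a line is a Webster's ALL-CAPS headword (e.g., 'ABASE', 'AARD-VARK')."""
--     stripped = line.strip()
--     if not stripped:
--         return False
--     remaining = set(stripped) - ALLOWED
--     return bool(remaining) and all(ch.isupper() for ch in remaining)
-- ===== Notes on version B (the rewrite author's own statement) =====
-- stated objective: idiomatic
-- what changed: replaces the single-pass flag-tracking loop with a set-difference formulation: deduplicate the stripped line's characters, subtract the allowed-punctuation set, and require the remainder to be nonempty and all uppercase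
import Mathlib
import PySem

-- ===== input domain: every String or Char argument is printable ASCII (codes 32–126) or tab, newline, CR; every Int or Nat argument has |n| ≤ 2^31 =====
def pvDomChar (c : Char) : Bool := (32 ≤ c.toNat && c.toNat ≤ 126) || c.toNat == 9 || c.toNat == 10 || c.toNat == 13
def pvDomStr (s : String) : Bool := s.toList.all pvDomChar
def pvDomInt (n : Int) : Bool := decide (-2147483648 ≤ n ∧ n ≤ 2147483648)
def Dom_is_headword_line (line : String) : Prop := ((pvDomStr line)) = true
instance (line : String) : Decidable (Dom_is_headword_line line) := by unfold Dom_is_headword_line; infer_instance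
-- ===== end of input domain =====

-- B replaces A's single-pass flag-tracking loop by a set-difference formulation (dedup, subtract the
-- allowed-punctuation set, check nonempty-and-all-uppercase); objective: idiomatic, same cost.

-- the allowed punctuation/digit characters (" -';,&1234567890")
def pvAllowed : List Char := [' ', '-', '\'', ';', ',', '&', '1', '2', '3', '4', '5', '6', '7', '8', '9', '0']

-- ===== PORT A =====
-- the for-loop with the has_letter flag and early return False
-- ('ch in " -…"' on a single char is exactly list membership, ported as contains)
def pvLoopA : List Char → Bool → Bool
  | [], hasLetter => hasLetter
  | c :: cs, hasLetter =>
    if PySem.Chars.isupper c then pvLoopA cs true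
    else if pvAllowed.contains c then pvLoopA cs hasLetter
    else false

def is_headword_line (line : String) : Bool :=
  let stripped := (PySem.Str.strip line).toList
  if stripped.isEmpty || decide (stripped.length < 1) then false
  else pvLoopA stripped false

-- ===== PORT B =====
def is_headword_line_alt (line : String) : Bool :=
  let stripped := (PySem.Str.strip line).toList
  if stripped.isEmpty then false
  else
    let remaining := PySem.Set.diff (PySem.Set.ofList stripped) (PySem.Set.ofList pvAllowed)
    !remaining.isEmpty && remaining.all PySem.Chars.isupper

-- ===== PRECONDITION & SPEC =====
def Spec_is_headword_line (line : String) (out : Bool) : Prop := out = is_headword_line_alt line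
instance (line : String) (out : Bool) : Decidable (Spec_is_headword_line line out) := by unfold Spec_is_headword_line; infer_instance

-- ===== CLAIM (what is proved, stated in full; the proofs are below) =====
def Claim_equal_is_headword_line : Prop := ∀ (line : String), Dom_is_headword_line line → Spec_is_headword_line line (is_headword_line line)

-- ===== LEMMAS AND PROOFS =====

-- A's loop computes: every char is uppercase-or-allowed, and the flag ends true.
theorem pvLoopA_eq (cs : List Char) (h : Bool) :
    pvLoopA cs h =
      (cs.all (fun c => PySem.Chars.isupper c || pvAllowed.contains c)
        && (h || cs.any PySem.Chars.isupper)) := by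
  induction cs generalizing h with
  | nil => simp [pvLoopA]
  | cons c cs ih =>
    simp only [pvLoopA, List.all_cons, List.any_cons]
    by_cases hu : PySem.Chars.isupper c
    · simp [hu, ih]
    · by_cases ha : pvAllowed.contains c
      · rw [List.contains_iff_mem] at ha
        simp [hu, ha, ih]
      · rw [List.contains_iff_mem] at ha
        simp [hu, ha]

-- no allowed character is uppercase
theorem pvAllowed_not_upper : ∀ c ∈ pvAllowed, PySem.Chars.isupper c = false := by
  intro c hc
  fin_cases hc <;> rfl

-- the set-difference test equals A's loop-body condition
theorem pv_key (cs : List Char) :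
    (cs.all (fun c => PySem.Chars.isupper c || pvAllowed.contains c)
       && (false || cs.any PySem.Chars.isupper))
    = (!(PySem.Set.diff (PySem.Set.ofList cs) (PySem.Set.ofList pvAllowed)).isEmpty
       && (PySem.Set.diff (PySem.Set.ofList cs) (PySem.Set.ofList pvAllowed)).all PySem.Chars.isupper) := by
  rw [Bool.eq_iff_iff]
  simp only [Bool.false_or, Bool.and_eq_true, List.all_eq_true, List.any_eq_true,
    Bool.not_eq_eq_eq_not, Bool.not_true, List.isEmpty_eq_false_iff_exists_mem,
    PySem.Set.mem_diff, PySem.Set.mem_ofList, Bool.or_eq_true, List.contains_iff_mem]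
  constructor
  · rintro ⟨hall, c, hc, hu⟩
    refine ⟨⟨c, hc, fun hmem => ?_⟩, fun x ⟨hx, hxna⟩ => ?_⟩
    · have := pvAllowed_not_upper c hmem; simp [this] at hu
    · rcases hall x hx with h | h
      · exact h
      · exact absurd h hxna
  · rintro ⟨⟨c, hc, hcna⟩, hall⟩
    refine ⟨fun x hx => ?_, c, hc, hall c ⟨hc, hcna⟩⟩
    by_cases hxa : x ∈ pvAllowed
    · exact Or.inr hxa
    · exact Or.inl (hall x ⟨hx, hxa⟩)

-- the whole-function equation, stated on the stripped character list
theorem pv_main (cs : List Char) :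
    (if cs.isEmpty || decide (cs.length < 1) then false else pvLoopA cs false)
    = (if cs.isEmpty then false
       else !(PySem.Set.diff (PySem.Set.ofList cs) (PySem.Set.ofList pvAllowed)).isEmpty
         && (PySem.Set.diff (PySem.Set.ofList cs) (PySem.Set.ofList pvAllowed)).all PySem.Chars.isupper) := by
  cases cs with
  | nil => rfl
  | cons a t => simpa [pvLoopA_eq] using pv_key (a :: t)

-- ===== VERDICT (by name: the statement is the Claim_ definition above) =====
theorem is_headword_line_spec : Claim_equal_is_headword_line := by
  intro line _
  unfold Spec_is_headword_line is_headword_line is_headword_line_alt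
  exact pv_main ((PySem.Str.strip line).toList)
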